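-- pv_equiv track=rewrite | github.com/sansten/ninai | backend/app/agents/metadata_extraction_agent.py | _uniq_sorted
-- ===== SOURCE A (Python) =====
-- def _uniq_sorted(items: list[str]) -> list[str]:
--     seen: set[str] = set()
--     out: list[str] = []
--     for x in items:
--         v = (x or "").strip()
--         if not v:
--             continue
--         key = v.lower()
--         if key in seen:
--             continue
--         seen.add(key)
--         out.append(v)
--     return sorted(out, key=lambda s: s.lower())
-- ===== SOURCE B (Python) =====
-- def _uniq_sorted(items: list[str]) -> list[str]:
--     vals = [v for v in ((x or "").strip() for x in items) if v]
--     vals.sort(key=str.lower)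
--     out: list[str] = []
--     prev = None
--     for v in vals:
--         k = v.lower()
--         if k != prev:
--             out.append(v)
--             prev = k
--     return out
-- ===== Notes on version B (the rewrite author's own statement) =====
-- stated objective: alternative
-- what changed: Instead of tracking a seen-set of lowercase keys while scanning and sorting the deduped survivors at the end, B first stably sorts all stripped non-empty values by their lowercase form and then dedupes in one adjacent pass, keeping an element only when its lowercase key differs from the previously kept one; sort stability guarantees the first-occurrence casing survives.
import Mathlib
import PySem

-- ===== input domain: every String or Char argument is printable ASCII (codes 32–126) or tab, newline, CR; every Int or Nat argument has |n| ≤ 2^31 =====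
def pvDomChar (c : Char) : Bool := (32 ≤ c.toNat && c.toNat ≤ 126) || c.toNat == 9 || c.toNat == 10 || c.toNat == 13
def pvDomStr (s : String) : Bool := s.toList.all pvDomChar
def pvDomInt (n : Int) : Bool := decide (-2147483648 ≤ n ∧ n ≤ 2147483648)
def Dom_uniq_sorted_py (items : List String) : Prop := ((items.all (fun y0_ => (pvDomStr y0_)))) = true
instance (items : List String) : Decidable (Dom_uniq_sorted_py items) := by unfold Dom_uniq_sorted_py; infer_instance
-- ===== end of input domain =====

-- B dedupes case-insensitively by a stable sort followed by one adjacent-key pass, instead of A's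
-- seen-set scan followed by a final sort (objective: alternative decomposition, same O(n log n) cost).

-- ===== PORT A =====
def uniq_sorted_py (items : List String) : List String :=
  let st : PySem.Set String × List String :=
    items.foldl (fun acc x =>
      let v := PySem.Str.strip (if x = "" then "" else x)   -- (x or "").strip()
      if v = "" then acc                                     -- if not v: continue
      else
        let key := PySem.Str.lower v
        if acc.1.contains key then acc                       -- if key in seen: continue
        else (acc.1.add key, acc.2 ++ [v]))                  -- seen.add(key); out.append(v)
      (PySem.Set.empty, [])
  PySem.List.sorted st.2 (fun s => PySem.Str.lower s) false

-- ===== PORT B =====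
def uniq_sorted_py_alt (items : List String) : List String :=
  let vals := items.filterMap (fun x =>
    let v := PySem.Str.strip (if x = "" then "" else x)
    if v = "" then none else some v)
  let svals := PySem.List.sorted vals (fun s => PySem.Str.lower s) false
  (svals.foldl (fun (acc : List String × Option String) v =>
      let k := PySem.Str.lower v
      if acc.2 = some k then acc else (acc.1 ++ [v], some k))
    ([], none)).1

-- ===== PRECONDITION & SPEC =====
def Spec_uniq_sorted_py (items : List String) (out : List String) : Prop := out = uniq_sorted_py_alt items
instance (items : List String) (out : List String) : Decidable (Spec_uniq_sorted_py items out) := by unfold Spec_uniq_sorted_py; infer_instance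

-- ===== CLAIM (what is proved, stated in full; the proofs are below) =====
def Claim_equal_uniq_sorted_py : Prop := ∀ (items : List String), Dom_uniq_sorted_py items → Spec_uniq_sorted_py items (uniq_sorted_py items)

-- ===== LEMMAS AND PROOFS =====

-- lowercase key
def pvKey (s : String) : String := PySem.Str.lower s

-- first-occurrence dedup by key, given the set of keys already seen (A's loop)
def pvDD (seen : PySem.Set String) : List String → List String
  | [] => []
  | v :: t => if seen.contains (pvKey v) then pvDD seen t
              else v :: pvDD (seen.add (pvKey v)) t

-- adjacent-key dedup, given the last kept key (B's loop)
def pvAdj (prev : Option String) : List String → List String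
  | [] => []
  | v :: t => if prev = some (pvKey v) then pvAdj prev t
              else v :: pvAdj (some (pvKey v)) t

-- the cleaned list of stripped non-empty values
def pvClean (items : List String) : List String :=
  items.filterMap (fun x =>
    let v := PySem.Str.strip (if x = "" then "" else x)
    if v = "" then none else some v)

theorem pvA_foldl (items : List String) (seen : PySem.Set String) (out : List String) :
    (items.foldl (fun acc x =>
      let v := PySem.Str.strip (if x = "" then "" else x)
      if v = "" then acc
      else
        let key := PySem.Str.lower v
        if acc.1.contains key then acc
        else (acc.1.add key, acc.2 ++ [v])) (seen, out)).2
    = out ++ pvDD seen (pvClean items) := by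
  induction items generalizing seen out with
  | nil => simp [pvClean, pvDD]
  | cons x t ih =>
    simp only [List.foldl_cons, pvClean, List.filterMap_cons]
    by_cases hve : PySem.Str.strip (if x = "" then "" else x) = ""
    · simpa [hve, pvClean] using ih seen out
    · by_cases hc : PySem.Str.lower (PySem.Str.strip (if x = "" then "" else x)) ∈ seen
      · simpa [hve, hc, pvDD, pvKey, PySem.Set.contains, pvClean] using ih seen out
      · simpa [hve, hc, pvDD, pvKey, PySem.Set.contains, pvClean] using
          ih (seen.add (PySem.Str.lower (PySem.Str.strip (if x = "" then "" else x))))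
             (out ++ [PySem.Str.strip (if x = "" then "" else x)])

theorem pvB_foldl (l : List String) (out : List String) (prev : Option String) :
    (l.foldl (fun (acc : List String × Option String) v =>
      let k := PySem.Str.lower v
      if acc.2 = some k then acc else (acc.1 ++ [v], some k)) (out, prev)).1
    = out ++ pvAdj prev l := by
  induction l generalizing out prev with
  | nil => simp [pvAdj]
  | cons v t ih =>
    by_cases h : prev = some (PySem.Str.lower v)
    · simpa [pvAdj, h, pvKey] using ih out prev
    · simpa [pvAdj, h, pvKey] using ih (out ++ [v]) (some (PySem.Str.lower v))

-- filtering commutes with insertBy when the inserted element does not match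
theorem pvFilter_insertBy_ne (bef : String → String → Bool) (p : String → Bool) (x : String)
    (hx : p x = false) (acc : List String) :
    (PySem.List.insertBy bef x acc).filter p = acc.filter p := by
  induction acc with
  | nil => simp [PySem.List.insertBy, hx]
  | cons y ys ih =>
    simp only [PySem.List.insertBy]
    by_cases hb : bef x y
    · simp [hb, hx]
    · by_cases hy : p y <;> simp [hb, hy, ih]

theorem pvInsertBy_cons (bef : String → String → Bool) (x y : String) (ys : List String) :
    PySem.List.insertBy bef x (y :: ys) =
      if bef x y then x :: y :: ys else y :: PySem.List.insertBy bef x ys := rfl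

-- on a key-sorted accumulator, inserting an element with key k appends it at the end of the k-run
theorem pvFilter_insertBy_eq (k : String) (x : String) (hx : pvKey x = k) (acc : List String)
    (hs : acc.Pairwise (fun a b => pvKey a ≤ pvKey b)) :
    (PySem.List.insertBy (fun a b => decide (pvKey a < pvKey b)) x acc).filter
        (fun v => pvKey v == k)
    = acc.filter (fun v => pvKey v == k) ++ [x] := by
  induction acc with
  | nil => simp [PySem.List.insertBy, hx]
  | cons y ys ih =>
    rcases List.pairwise_cons.mp hs with ⟨h1, h2⟩
    rw [pvInsertBy_cons]
    by_cases hb : pvKey x < pvKey y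
    · rw [if_pos (decide_eq_true hb)]
      have hy : pvKey y ≠ k := fun h => absurd hb (not_lt.mpr (le_of_eq (h.trans hx.symm)))
      have hys : ∀ w ∈ ys, pvKey w ≠ k := by
        intro w hw h
        exact absurd hb (not_lt.mpr ((h1 w hw).trans (le_of_eq (h.trans hx.symm))))
      have hnil : ys.filter (fun v => pvKey v == k) = [] :=
        List.filter_eq_nil_iff.mpr (by intro w hw; simpa using hys w hw)
      simp [hx, hy, hnil]
    · rw [if_neg (by simpa using hb)]
      simp only [List.filter_cons]
      by_cases hy : pvKey y = k
      · rw [show (pvKey y == k) = true from by simpa using hy, if_pos rfl, if_pos rfl]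
        exact congrArg (List.cons y) (ih h2)
      · rw [show (pvKey y == k) = false from by simpa using hy]
        rw [if_neg Bool.false_ne_true, if_neg Bool.false_ne_true]
        exact ih h2

-- stability: sorting by key preserves each equal-key run in order
theorem pvSorted_filter (l : List String) (k : String) :
    (PySem.List.sorted l (fun s => pvKey s) false).filter (fun v => pvKey v == k)
    = l.filter (fun v => pvKey v == k) := by
  induction l using List.reverseRecOn with
  | nil => simp [PySem.List.sorted]
  | append_singleton t x ih =>
    have hstep : PySem.List.sorted (t ++ [x]) (fun s => pvKey s) false
        = PySem.List.insertBy (fun a b => decide (pvKey a < pvKey b)) x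
            (PySem.List.sorted t (fun s => pvKey s) false) := by
      rw [PySem.List.sorted_eq_foldl_insertBy, PySem.List.sorted_eq_foldl_insertBy,
        List.foldl_append, List.foldl_cons, List.foldl_nil]
    rw [hstep]
    by_cases hx : pvKey x = k
    · rw [pvFilter_insertBy_eq k x hx _ (PySem.List.sorted_pairwise t (fun s => pvKey s)), ih,
        List.filter_append]
      simp [hx]
    · rw [pvFilter_insertBy_ne _ _ x (by simpa using hx), ih, List.filter_append]
      simp [hx]

theorem pvMem_dd (l : List String) (seen : PySem.Set String) (x : String) :
    x ∈ pvDD seen l ↔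
      pvKey x ∉ seen ∧ (l.filter (fun v => pvKey v == pvKey x)).head? = some x := by
  induction l generalizing seen with
  | nil => simp [pvDD]
  | cons v t ih =>
    by_cases hc : pvKey v ∈ seen
    · rw [show pvDD seen (v :: t) = pvDD seen t from by
        simp [pvDD, PySem.Set.contains, hc], ih]
      by_cases hk : pvKey v = pvKey x
      · exact iff_of_false (fun ⟨h1, _⟩ => h1 (hk ▸ hc)) (fun ⟨h1, _⟩ => h1 (hk ▸ hc))
      · rw [List.filter_cons, if_neg (by simpa using hk)]
    · rw [show pvDD seen (v :: t) = v :: pvDD (seen.add (pvKey v)) t from by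
        simp [pvDD, PySem.Set.contains, hc], List.mem_cons, ih]
      by_cases hk : pvKey v = pvKey x
      · have hadd : pvKey x ∈ seen.add (pvKey v) :=
          (PySem.Set.mem_add _ _ _).mpr (Or.inr hk.symm)
        constructor
        · rintro (rfl | ⟨h1, _⟩)
          · exact ⟨fun h => hc (hk ▸ h),
              by rw [List.filter_cons, if_pos (by simp), List.head?_cons]⟩
          · exact (h1 hadd).elim
        · rintro ⟨-, h2⟩
          rw [List.filter_cons, if_pos (by simpa using hk), List.head?_cons] at h2
          exact Or.inl (Option.some.inj h2).symm
      · have hxv : x ≠ v := fun h => hk (congrArg pvKey h).symm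
        have haddiff : pvKey x ∈ seen.add (pvKey v) ↔ pvKey x ∈ seen := by
          rw [PySem.Set.mem_add]
          exact or_iff_left (fun h => hk h.symm)
        rw [List.filter_cons, if_neg (by simpa using hk)]
        constructor
        · rintro (rfl | ⟨h1, h2⟩)
          · exact (hxv rfl).elim
          · exact ⟨fun h => h1 (haddiff.mpr h), h2⟩
        · rintro ⟨h1, h2⟩
          exact Or.inr ⟨fun h => h1 (haddiff.mp h), h2⟩

theorem pvDD_subset (l : List String) (seen : PySem.Set String) (x : String)
    (h : x ∈ pvDD seen l) : x ∈ l := by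
  have h2 := ((pvMem_dd l seen x).mp h).2
  have : x ∈ l.filter (fun v => pvKey v == pvKey x) := by
    rcases List.head?_eq_some_iff.mp h2 with ⟨t, ht⟩
    rw [ht]; exact List.mem_cons_self
  exact List.mem_of_mem_filter this

theorem pvDD_nodup (l : List String) (seen : PySem.Set String) : (pvDD seen l).Nodup := by
  induction l generalizing seen with
  | nil => simp [pvDD]
  | cons v t ih =>
    by_cases hc : pvKey v ∈ seen
    · rw [show pvDD seen (v :: t) = pvDD seen t from by
        simp [pvDD, PySem.Set.contains, hc]]
      exact ih seen
    · rw [show pvDD seen (v :: t) = v :: pvDD (seen.add (pvKey v)) t from by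
        simp [pvDD, PySem.Set.contains, hc]]
      refine List.nodup_cons.mpr ⟨?_, ih _⟩
      intro hmem
      exact ((pvMem_dd t _ v).mp hmem).1 ((PySem.Set.mem_add _ _ _).mpr (Or.inr rfl))

theorem pvDD_pairwise_lt (l : List String)
    (hs : l.Pairwise (fun a b => pvKey a ≤ pvKey b)) (seen : PySem.Set String) :
    (pvDD seen l).Pairwise (fun a b => pvKey a < pvKey b) := by
  induction l generalizing seen with
  | nil => simp [pvDD]
  | cons v t ih =>
    rcases List.pairwise_cons.mp hs with ⟨h1, h2⟩
    by_cases hc : pvKey v ∈ seen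
    · rw [show pvDD seen (v :: t) = pvDD seen t from by
        simp [pvDD, PySem.Set.contains, hc]]
      exact ih h2 seen
    · rw [show pvDD seen (v :: t) = v :: pvDD (seen.add (pvKey v)) t from by
        simp [pvDD, PySem.Set.contains, hc]]
      refine List.pairwise_cons.mpr ⟨?_, ih h2 _⟩
      intro w hw
      have hle : pvKey v ≤ pvKey w := h1 w (pvDD_subset _ _ _ hw)
      have hne : pvKey w ≠ pvKey v := fun h =>
        ((pvMem_dd t _ w).mp hw).1 ((PySem.Set.mem_add _ _ _).mpr (Or.inr h))
      exact lt_of_le_of_ne hle (fun h => hne h.symm)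

-- on a key-sorted list, adjacent-key dedup coincides with first-occurrence dedup
theorem pvAdj_eq_dd_aux (l : List String)
    (hs : l.Pairwise (fun a b => pvKey a ≤ pvKey b)) :
    ∀ (p : String) (seen : PySem.Set String),
      (∀ k ∈ seen, k ≤ p) → p ∈ seen → (∀ v ∈ l, p ≤ pvKey v) →
      pvAdj (some p) l = pvDD seen l := by
  induction l with
  | nil => intros; simp [pvAdj, pvDD]
  | cons v t ih =>
    intro p seen hub hp hlb
    rcases List.pairwise_cons.mp hs with ⟨h1, h2⟩
    by_cases hk : pvKey v = p
    · have hc : pvKey v ∈ seen := by rwa [hk]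
      rw [show pvDD seen (v :: t) = pvDD seen t from by
        simp [pvDD, PySem.Set.contains, hc]]
      rw [show pvAdj (some p) (v :: t) = pvAdj (some p) t from by
        simp [pvAdj, hk]]
      exact ih h2 p seen hub hp (fun w hw => hlb w (List.mem_cons_of_mem v hw))
    · have hlt : p < pvKey v :=
        lt_of_le_of_ne (hlb v List.mem_cons_self) (fun h => hk h.symm)
      have hc : pvKey v ∉ seen := fun hmem => absurd (hub _ hmem) (not_le.mpr hlt)
      rw [show pvDD seen (v :: t) = v :: pvDD (seen.add (pvKey v)) t from by
        simp [pvDD, PySem.Set.contains, hc]]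
      rw [show pvAdj (some p) (v :: t) = v :: pvAdj (some (pvKey v)) t from by
        simp only [pvAdj]
        rw [if_neg (fun h => hk (Option.some.inj h).symm)]]
      congr 1
      refine ih h2 (pvKey v) (seen.add (pvKey v)) ?_ ?_ h1
      · intro k hkm
        rcases (PySem.Set.mem_add _ _ _).mp hkm with hkm | rfl
        · exact (hub k hkm).trans hlt.le
        · exact le_rfl
      · exact (PySem.Set.mem_add _ _ _).mpr (Or.inr rfl)

theorem pvAdj_eq_dd (l : List String)
    (hs : l.Pairwise (fun a b => pvKey a ≤ pvKey b)) :
    pvAdj none l = pvDD PySem.Set.empty l := by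
  cases l with
  | nil => simp [pvAdj, pvDD]
  | cons v t =>
    rcases List.pairwise_cons.mp hs with ⟨h1, h2⟩
    rw [show pvDD PySem.Set.empty (v :: t)
          = v :: pvDD (PySem.Set.empty.add (pvKey v)) t from by
        simp [pvDD, PySem.Set.contains, PySem.Set.empty]]
    rw [show pvAdj none (v :: t) = v :: pvAdj (some (pvKey v)) t from by
        simp [pvAdj]]
    congr 1
    refine pvAdj_eq_dd_aux t h2 (pvKey v) (PySem.Set.empty.add (pvKey v)) ?_ ?_ h1
    · intro k hkm
      rcases (PySem.Set.mem_add _ _ _).mp hkm with hkm | rfl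
      · simp [PySem.Set.empty] at hkm
      · exact le_rfl
    · exact (PySem.Set.mem_add _ _ _).mpr (Or.inr rfl)

theorem pvDD_perm (l : List String) :
    (pvDD PySem.Set.empty (PySem.List.sorted l (fun s => pvKey s) false)).Perm
      (pvDD PySem.Set.empty l) := by
  refine (List.perm_ext_iff_of_nodup (pvDD_nodup _ _) (pvDD_nodup _ _)).mpr ?_
  intro x
  rw [pvMem_dd, pvMem_dd, pvSorted_filter]

-- ===== VERDICT (by name: the statement is the Claim_ definition above) =====
theorem uniq_sorted_py_spec : Claim_equal_uniq_sorted_py := by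
  intro items _
  unfold Spec_uniq_sorted_py uniq_sorted_py uniq_sorted_py_alt
  dsimp only
  rw [pvA_foldl items PySem.Set.empty [], pvB_foldl, List.nil_append, List.nil_append]
  have hkey : (fun s => PySem.Str.lower s) = (fun s => pvKey s) := rfl
  have hclean : (items.filterMap (fun x =>
      if PySem.Str.strip (if x = "" then "" else x) = "" then none
      else some (PySem.Str.strip (if x = "" then "" else x)))) = pvClean items := rfl
  rw [hkey, hclean]
  rw [pvAdj_eq_dd _ (PySem.List.sorted_pairwise (pvClean items) (fun s => pvKey s))]
  exact PySem.List.sorted_eq_of_perm_of_pairwise_lt _ _ _ (pvDD_perm (pvClean items))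
    (pvDD_pairwise_lt _ (PySem.List.sorted_pairwise _ _) _)
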